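-- pv_equiv track=rewrite | github.com/jonddeck/Sorting-Algorithms | Postman Sort/postman_sort.py | count_sort_by_digit_position
-- ===== SOURCE A (Python) =====
-- def count_sort_by_digit_position(arr, position):
--     """
--     Counting sort based on digit at given position.
--
--     Args:
--         arr: List of padded strings
--         position: Digit position to sort by
--
--     Returns:
--         Sorted list
--     """
--     buckets = {}
--
--     for string in arr:
--         if position < len(string):
--             digit = string[position]
--         else:
--             digit = '0'
--
--         if digit not in buckets:
--             buckets[digit] = []
--         buckets[digit].append(string)
--
--     result = []
--     for digit in sorted(buckets.keys()):
--         result.extend(buckets[digit])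
--
--     return result
-- ===== SOURCE B (Python) =====
-- def count_sort_by_digit_position(arr, position):
--     """Single stable sort keyed on the digit at `position` ('0' past the end),
--     replacing A's bucket dict + sorted-keys emission."""
--     return sorted(arr, key=lambda s: s[position] if position < len(s) else '0')
-- ===== Notes on version B (the rewrite author's own statement) =====
-- stated objective: idiomatic
-- what changed: Replaces the dict-of-buckets counting sort (build buckets keyed by the digit, then emit buckets in sorted key order) with a single stable built-in sort keyed on that digit; stability of sorted() reproduces the bucket-append order exactly.
import Mathlib
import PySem

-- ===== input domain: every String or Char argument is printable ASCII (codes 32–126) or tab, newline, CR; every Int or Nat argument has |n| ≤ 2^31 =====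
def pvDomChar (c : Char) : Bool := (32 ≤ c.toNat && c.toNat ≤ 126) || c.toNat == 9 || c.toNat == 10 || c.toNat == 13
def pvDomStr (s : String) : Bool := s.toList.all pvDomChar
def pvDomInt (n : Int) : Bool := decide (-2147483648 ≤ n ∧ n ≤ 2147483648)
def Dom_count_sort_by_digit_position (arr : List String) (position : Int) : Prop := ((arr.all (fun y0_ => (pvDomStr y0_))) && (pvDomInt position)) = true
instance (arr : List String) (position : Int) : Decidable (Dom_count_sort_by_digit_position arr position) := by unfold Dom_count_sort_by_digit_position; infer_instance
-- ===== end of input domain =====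

-- B replaces A's dict-of-buckets counting sort by one stable key-based sort; equal on every
-- input where A returns (Pre_ excludes only the negative positions on which Python A raises).

-- ===== PORT A =====
-- shared helper: the digit key `string[position] if position < len(string) else '0'`
-- (both Pythons contain this exact expression); pyGet? is none = IndexError only outside Pre_
def pvDigit (position : Int) (s : String) : Char :=
  if position < (s.toList.length : Int) then (PySem.List.pyGet? s.toList position).getD '0'
  else '0'

def count_sort_by_digit_position (arr : List String) (position : Int) : List String :=
  let buckets : PySem.Dict Char (List String) :=
    arr.foldl (fun d string =>
      let digit := pvDigit position string
      -- `if digit not in buckets: buckets[digit] = []`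
      let d1 := if d.contains digit then d else d.insert digit ([] : List String)
      -- `buckets[digit].append(string)`
      d1.insert digit (d1.getD digit [] ++ [string])) PySem.Dict.empty
  (PySem.List.sorted buckets.keys (fun c => c) false).foldl
    (fun result digit => result ++ buckets.getD digit []) []

-- ===== PORT B =====
def count_sort_by_digit_position_alt (arr : List String) (position : Int) : List String :=
  PySem.List.sorted arr (pvDigit position) false

-- ===== PRECONDITION & SPEC =====
-- Pre_ excludes exactly the inputs where Python A raises IndexError: a negative position
-- whose magnitude exceeds some string's length (B's Python raises there too).
def Pre_count_sort_by_digit_position (arr : List String) (position : Int) : Prop :=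
  0 ≤ position ∨ ∀ s ∈ arr, -position ≤ (s.toList.length : Int)
instance (arr : List String) (position : Int) : Decidable (Pre_count_sort_by_digit_position arr position) := by unfold Pre_count_sort_by_digit_position; infer_instance

def pvWitness_count_sort_by_digit_position : List String × Int := (["23", "11", "32"], 1)

def Spec_count_sort_by_digit_position (arr : List String) (position : Int) (out : List String) : Prop := out = count_sort_by_digit_position_alt arr position
instance (arr : List String) (position : Int) (out : List String) : Decidable (Spec_count_sort_by_digit_position arr position out) := by unfold Spec_count_sort_by_digit_position; infer_instance

-- ===== CLAIM (what is proved, stated in full; the proofs are below) =====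
def Claim_equal_count_sort_by_digit_position : Prop := ∀ (arr : List String) (position : Int), Dom_count_sort_by_digit_position arr position → Pre_count_sort_by_digit_position arr position → Spec_count_sort_by_digit_position arr position (count_sort_by_digit_position arr position)

-- ===== LEMMAS AND PROOFS =====

-- insertBy skips a prefix it does not go before
theorem pv_insertBy_skip {α : Type} (before : α → α → Bool) (x : α) (L M : List α)
    (h : ∀ y ∈ L, before x y = false) :
    PySem.List.insertBy before x (L ++ M) = L ++ PySem.List.insertBy before x M := by
  induction L with
  | nil => rfl
  | cons a L ih =>
      simp only [List.cons_append, PySem.List.insertBy, h a (by simp)]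
      simp [ih (fun y hy => h y (by simp [hy]))]

-- insertBy goes in front when it goes before everything
theorem pv_insertBy_front {α : Type} (before : α → α → Bool) (x : α) (M : List α)
    (h : ∀ y ∈ M, before x y = true) :
    PySem.List.insertBy before x M = x :: M := by
  cases M with
  | nil => rfl
  | cons a M => simp [PySem.List.insertBy, h a (by simp)]

theorem pv_flatMap_congr {α β : Type} (K : List α) (f g : α → List β)
    (h : ∀ c ∈ K, f c = g c) : K.flatMap f = K.flatMap g := by
  induction K with
  | nil => rfl
  | cons a K ih => simp [List.flatMap_cons, h a (by simp), ih (fun c hc => h c (by simp [hc]))]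

-- inserting x into strictly-key-increasing blocks, its key already a block key:
-- x lands at the end of its block
theorem pv_insertBy_flatMap_mem {α κ : Type} [LinearOrder κ] [BEq κ] [LawfulBEq κ]
    (key : α → κ) (x : α) (K : List κ) (B : κ → List α)
    (hK : K.Pairwise (· < ·)) (hmem : key x ∈ K)
    (hB : ∀ c ∈ K, ∀ s ∈ B c, key s = c) :
    PySem.List.insertBy (fun a b => decide (key a < key b)) x (K.flatMap B)
      = K.flatMap (fun c => B c ++ if key x == c then [x] else []) := by
  induction K with
  | nil => cases hmem
  | cons c K ih =>
      simp only [List.flatMap_cons]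
      rcases List.mem_cons.mp hmem with hc | hc
      · -- key x = c : skip the block B c, then insert in front of the rest
        subst hc
        rw [pv_insertBy_skip _ _ _ _ (fun y hy => by
          simp [hB _ (by simp) y hy])]
        have hfront : ∀ y ∈ K.flatMap B, (fun a b => decide (key a < key b)) x y = true := by
          intro y hy
          rcases List.mem_flatMap.mp hy with ⟨d, hd, hyd⟩
          have : key x < d := (List.pairwise_cons.mp hK).1 d hd
          simp [hB d (by simp [hd]) y hyd, this]
        rw [pv_insertBy_front _ _ _ hfront]
        have hnot : key x ∉ K := fun h =>
          lt_irrefl (key x) ((List.pairwise_cons.mp hK).1 _ h)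
        rw [pv_flatMap_congr K (fun c => B c ++ if key x == c then [x] else []) B
          (fun d hd => by
            have hxd : (key x == d) = false := by
              have : key x ≠ d := fun h => hnot (h ▸ hd)
              simp [this]
            simp [hxd])]
        simp
      · -- key x ≠ c (strict order: c < key x since key x ∈ K) : skip B c, recurse
        have hlt : c < key x := (List.pairwise_cons.mp hK).1 _ hc
        rw [pv_insertBy_skip _ _ _ _ (fun y hy => by
          simp [hB c (by simp) y hy, not_lt.mpr (le_of_lt hlt)])]
        rw [ih (List.pairwise_cons.mp hK).2 hc
          (fun d hd s hs => hB d (by simp [hd]) s hs)]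
        have : (key x == c) = false := by simp [ne_of_gt hlt]
        simp [this]

-- inserting x whose key is new: a fresh singleton block appears at the key's sorted slot
theorem pv_insertBy_flatMap_notmem {α κ : Type} [LinearOrder κ] [BEq κ] [LawfulBEq κ]
    (key : α → κ) (x : α) (K : List κ) (B : κ → List α)
    (hK : K.Pairwise (· < ·)) (hmem : key x ∉ K)
    (hB : ∀ c ∈ K, ∀ s ∈ B c, key s = c) (hB0 : B (key x) = []) :
    PySem.List.insertBy (fun a b => decide (key a < key b)) x (K.flatMap B)
      = (PySem.List.insertBy (fun a b => decide (a < b)) (key x) K).flatMap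
          (fun c => B c ++ if key x == c then [x] else []) := by
  induction K with
  | nil => simp [PySem.List.insertBy, hB0]
  | cons c K ih =>
      have hne : key x ≠ c := fun h => hmem (by simp [h])
      rcases lt_or_gt_of_ne hne with hlt | hgt
      · -- key x < c : x goes in front of everything
        have hfront : ∀ y ∈ (c :: K).flatMap B, (fun a b => decide (key a < key b)) x y = true := by
          intro y hy
          rcases List.mem_flatMap.mp hy with ⟨d, hd, hyd⟩
          have hcd : c ≤ d := by
            rcases List.mem_cons.mp hd with h | h
            · exact h ▸ le_refl c
            · exact le_of_lt ((List.pairwise_cons.mp hK).1 d h)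
          simp [hB d hd y hyd, lt_of_lt_of_le hlt hcd]
        rw [pv_insertBy_front _ _ _ hfront]
        have : PySem.List.insertBy (fun a b => decide (a < b)) (key x) (c :: K)
            = key x :: c :: K := by simp [PySem.List.insertBy, hlt]
        rw [this]
        simp only [List.flatMap_cons, hB0]
        rw [pv_flatMap_congr K (fun c => B c ++ if key x == c then [x] else []) B
          (fun d hd => by
            have hxd : (key x == d) = false := by
              have : key x ≠ d := fun h => hmem (by simp [h ▸ hd])
              simp [this]
            simp [hxd])]
        have hxc : (key x == c) = false := by simp [hne]
        simp [hne]
      · -- c < key x : skip B c, recurse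
        simp only [List.flatMap_cons]
        rw [pv_insertBy_skip _ _ _ _ (fun y hy => by
          simp [hB c (by simp) y hy, not_lt.mpr (le_of_lt hgt)])]
        rw [ih (List.pairwise_cons.mp hK).2 (fun h => hmem (by simp [h]))
          (fun d hd s hs => hB d (by simp [hd]) s hs)]
        have hins : PySem.List.insertBy (fun a b => decide (a < b)) (key x) (c :: K)
            = c :: PySem.List.insertBy (fun a b => decide (a < b)) (key x) K := by
          simp [PySem.List.insertBy, not_lt.mpr (le_of_lt hgt)]
        rw [hins]
        have hxc : (key x == c) = false := by simp [hne]
        simp [hne]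

-- the stable sort IS the bucket concatenation over the sorted distinct keys
theorem pv_sorted_eq_flatMap {α κ : Type} [LinearOrder κ] [BEq κ] [LawfulBEq κ]
    (key : α → κ) (xs : List α) :
    PySem.List.sorted xs key false
      = (PySem.List.sorted (PySem.Set.ofList (xs.map key)) (fun c => c) false).flatMap
          (fun c => xs.filter (fun s => key s == c)) := by
  induction xs using List.reverseRecOn with
  | nil => rfl
  | append_singleton xs x ih =>
      have hstep : PySem.List.sorted (xs ++ [x]) key false
          = PySem.List.insertBy (fun a b => decide (key a < key b)) x
              (PySem.List.sorted xs key false) := by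
        rw [PySem.List.sorted_eq_foldl_insertBy, PySem.List.sorted_eq_foldl_insertBy,
          List.foldl_append]
        rfl
      have hofadd : PySem.Set.ofList ((xs ++ [x]).map key)
          = PySem.Set.add (PySem.Set.ofList (xs.map key)) (key x) := by
        simp [PySem.Set.ofList, List.foldl_append]
      set S := PySem.Set.ofList (xs.map key) with hS
      set K := PySem.List.sorted S (fun c => c) false with hKdef
      have hKpair : K.Pairwise (· < ·) := PySem.List.sorted_ofList_pairwise_lt _
      have hBkey : ∀ c ∈ K, ∀ s ∈ List.filter (fun s => key s == c) xs, key s = c := by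
        intro c _ s hs
        exact beq_iff_eq.mp (List.mem_filter.mp hs).2
      have hfilt : ∀ c, List.filter (fun s => key s == c) (xs ++ [x])
          = List.filter (fun s => key s == c) xs ++ (if key x == c then [x] else []) := by
        intro c; rw [List.filter_append]
        by_cases h : (key x == c) = true <;> simp [List.filter, h]
      by_cases hmem : key x ∈ S
      · have hadd : PySem.Set.add S (key x) = S := by
          have hc : PySem.Set.contains S (key x) = true := (PySem.Set.contains_iff _ _).mpr hmem
          unfold PySem.Set.add
          rw [hc]
          simp
        rw [hstep, ih, hofadd, hadd,
          pv_insertBy_flatMap_mem key x K _ hKpair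
            ((PySem.List.mem_sorted _ _ _ _).mpr hmem) hBkey]
        exact (pv_flatMap_congr _ _ _ (fun c _ => (hfilt c).symm))
      · have hadd : PySem.Set.add S (key x) = S ++ [key x] := by
          have hc : PySem.Set.contains S (key x) = false := by
            rw [Bool.eq_false_iff]
            exact fun h => hmem ((PySem.Set.contains_iff _ _).mp h)
          unfold PySem.Set.add
          rw [hc]
          simp
        have hsortadd : PySem.List.sorted (S ++ [key x]) (fun c => c) false
            = PySem.List.insertBy (fun a b => decide (a < b)) (key x) K := by
          rw [hKdef, PySem.List.sorted_eq_foldl_insertBy, PySem.List.sorted_eq_foldl_insertBy,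
            List.foldl_append]
          rfl
        have hB0 : List.filter (fun s => key s == key x) xs = [] := by
          rw [List.filter_eq_nil_iff]
          intro s hs hbeq
          exact hmem (by
            have : key s = key x := by simpa using hbeq
            exact (PySem.Set.mem_ofList _ _).mpr (this ▸ List.mem_map_of_mem hs))
        rw [hstep, ih, hofadd, hadd, hsortadd,
          pv_insertBy_flatMap_notmem key x K _ hKpair
            (fun h => hmem ((PySem.List.mem_sorted _ _ _ _).mp h)) hBkey hB0]
        exact (pv_flatMap_congr _ _ _ (fun c _ => (hfilt c).symm))

-- A's two-step bucket update is Dict.modify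
theorem pv_step_eq_modify (position : Int) (d : PySem.Dict Char (List String)) (s : String) :
    ((if d.contains (pvDigit position s) then d
      else d.insert (pvDigit position s) ([] : List String)).insert (pvDigit position s)
       ((if d.contains (pvDigit position s) then d
         else d.insert (pvDigit position s) ([] : List String)).getD (pvDigit position s) []
          ++ [s]))
      = d.modify (pvDigit position s) [] (fun l => l ++ [s]) := by
  by_cases h : d.contains (pvDigit position s)
  · simp [h, PySem.Dict.modify]
  · have hfalse : d.contains (pvDigit position s) = false := by simpa using h
    simp only [hfalse, Bool.false_eq_true, if_false]
    rw [PySem.Dict.getD_insert_self]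
    simp only [PySem.Dict.modify, PySem.Dict.getD_of_not_contains _ _ hfalse, List.nil_append]
    -- (d.insert k []).insert k [s] = d.insert k [s] when k is fresh
    apply PySem.Dict.ext
    have hfresh : ∀ p ∈ d.items, (p.1 == pvDigit position s) = false := by
      intro p hp
      by_contra hb
      have hpk : p.1 = pvDigit position s := by
        simpa using (Bool.not_eq_false _).mp hb
      have : d.contains (pvDigit position s) = true :=
        (PySem.Dict.contains_iff_mem_keys _ _).mpr (hpk ▸ PySem.Dict.mem_keys_of_mem_items d hp)
      simp [this] at hfalse
    rw [PySem.Dict.items_insert_of_contains _ _ (PySem.Dict.contains_insert_self _ _ _),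
      PySem.Dict.items_insert_of_not_contains _ _ hfalse,
      PySem.Dict.items_insert_of_not_contains _ _ hfalse]
    rw [List.map_append]
    simp only [List.map_cons, List.map_nil, BEq.refl]
    congr 1
    calc List.map (fun p => if (p.1 == pvDigit position s) = true
            then (pvDigit position s, [s]) else p) d.items
        = List.map id d.items := List.map_congr_left (fun p hp => by simp [hfresh p hp])
      _ = d.items := List.map_id _

-- ===== VERDICT (by name: the statement is the Claim_ definition above) =====
theorem count_sort_by_digit_position_spec : Claim_equal_count_sort_by_digit_position := by
  intro arr position _ _
  unfold Spec_count_sort_by_digit_position count_sort_by_digit_position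
    count_sort_by_digit_position_alt
  have hbuck : (arr.foldl (fun (d : PySem.Dict Char (List String)) string =>
        (if d.contains (pvDigit position string) then d
         else d.insert (pvDigit position string) ([] : List String)).insert
          (pvDigit position string)
          ((if d.contains (pvDigit position string) then d
            else d.insert (pvDigit position string) ([] : List String)).getD
            (pvDigit position string) [] ++ [string])) PySem.Dict.empty)
      = arr.foldl (fun d s => PySem.Dict.modify d (pvDigit position s) [] (fun l => l ++ [s]))
          PySem.Dict.empty :=
    PySem.List.foldl_congr_mem arr _ _ _ (fun d s _ => pv_step_eq_modify position d s)
  simp only []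
  rw [hbuck]
  -- keys of the fold = distinct digits in first-appearance order
  rw [PySem.Dict.keys_foldl_modify_key arr (pvDigit position) [] (fun _ s => fun l => l ++ [s])
    PySem.Dict.empty]
  -- emission loop = flatMap over the sorted keys
  rw [PySem.List.foldl_append_eq_flatMap]
  -- each bucket = the filter of arr on its digit
  have hbucket : ∀ c, (arr.foldl (fun d s =>
        PySem.Dict.modify d (pvDigit position s) [] (fun l => l ++ [s]))
        PySem.Dict.empty).getD c []
      = arr.filter (fun s => pvDigit position s == c) := by
    intro c
    rw [show arr.foldl (fun d s => PySem.Dict.modify d (pvDigit position s) [] (fun l => l ++ [s]))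
          PySem.Dict.empty
        = (arr.map (fun s => (pvDigit position s, s))).foldl
            (fun d p => PySem.Dict.modify d p.1 [] (fun l => l ++ [p.2])) PySem.Dict.empty
      from by rw [List.foldl_map]]
    rw [PySem.Dict.getD_foldl_modify_append]
    rw [List.filter_map, List.map_map]
    simp [Function.comp_def]
  have hkeys : PySem.Set.update (PySem.Dict.empty : PySem.Dict Char (List String)).keys
        (arr.map (pvDigit position))
      = PySem.Set.ofList (arr.map (pvDigit position)) := by
    rw [PySem.Dict.keys_empty]; rfl
  rw [List.nil_append, hkeys, pv_sorted_eq_flatMap (pvDigit position) arr]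
  exact pv_flatMap_congr _ _ _ (fun c _ => hbucket c)
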